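-- pv_equiv track=rewrite | github.com/Infinidrix/competitive-programming | Fall 2021 Week 2/Code For 1.py | tree_traverse
-- ===== SOURCE A (Python) =====
-- def tree_traverse(num, depth, node_count):
--     if depth == 0:
--         return []
--     if num >= (2 ** (depth - 1)):
--         num &= (1 << (depth - 1)) - 1
--         res = tree_traverse(num, depth - 1, node_count * 2)
--         res.append(node_count)
--     else:
--         res = tree_traverse(num, depth - 1, node_count * 2 - 1)
--         res.append(node_count - 1)
--     return res
-- ===== SOURCE B (Python) =====
-- def tree_traverse(num, depth, node_count):
--     res = []
--     half = 1 << (depth - 1) if depth > 0 else 0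
--     cur = node_count
--     d = depth
--     while d > 0:
--         if num >= half:
--             num &= half - 1
--             res.append(cur)
--             cur = cur * 2
--         else:
--             res.append(cur - 1)
--             cur = cur * 2 - 1
--         half >>= 1
--         d -= 1
--     res.reverse()
--     return res
-- ===== Notes on version B (the rewrite author's own statement) =====
-- stated objective: alternative
-- what changed: Replaces A's recursion, which recomputes 2**(depth-1) from scratch at every level, by a single iterative loop that keeps the running power of two (one shift per level) and the node index, appending to a list that is reversed once at the end.
import Mathlib
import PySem

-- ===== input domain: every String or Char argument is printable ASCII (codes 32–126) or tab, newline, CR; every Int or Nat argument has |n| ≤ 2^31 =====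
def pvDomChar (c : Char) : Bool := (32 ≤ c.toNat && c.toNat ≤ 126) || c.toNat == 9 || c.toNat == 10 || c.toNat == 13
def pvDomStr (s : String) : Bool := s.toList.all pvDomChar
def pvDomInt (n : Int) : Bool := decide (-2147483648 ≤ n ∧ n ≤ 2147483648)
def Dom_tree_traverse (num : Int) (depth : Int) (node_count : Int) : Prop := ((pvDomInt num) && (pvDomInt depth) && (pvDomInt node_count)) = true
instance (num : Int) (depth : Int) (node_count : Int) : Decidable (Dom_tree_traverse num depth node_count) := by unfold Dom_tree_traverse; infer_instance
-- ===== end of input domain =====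

-- B replaces A's recursion (which recomputes 2**(depth-1) at every level) by one iterative
-- pass that maintains the running power of two and the node index; objective: alternative/iterative.

-- ===== PORT A =====
-- literal transliteration of A's recursion; Python recurses forever for depth < 0
-- (excluded by Pre_), the port returns [] there so that it is total.
def tree_traverse (num : Int) (depth : Int) (node_count : Int) : List Int :=
  if depth ≤ 0 then []
  else if num ≥ 2 ^ (depth - 1).toNat then
    tree_traverse (PySem.Int.band num (((1 : Int) <<< (depth - 1).toNat) - 1)) (depth - 1) (node_count * 2)
      ++ [node_count]
  else
    tree_traverse num (depth - 1) (node_count * 2 - 1) ++ [node_count - 1]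
termination_by depth.toNat
decreasing_by all_goals omega

-- ===== PORT B =====
-- the while loop of Source B, state (num, half, cur, d, res)
def treeLoop (num half cur d : Int) (res : List Int) : List Int :=
  if d ≤ 0 then res
  else if num ≥ half then
    treeLoop (PySem.Int.band num (half - 1)) (half >>> (1 : Nat)) (cur * 2) (d - 1) (res ++ [cur])
  else
    treeLoop num (half >>> (1 : Nat)) (cur * 2 - 1) (d - 1) (res ++ [cur - 1])
termination_by d.toNat
decreasing_by all_goals omega

def tree_traverse_alt (num : Int) (depth : Int) (node_count : Int) : List Int :=
  let half : Int := if 0 < depth then (1 : Int) <<< (depth - 1).toNat else 0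
  (treeLoop num half node_count depth []).reverse

-- ===== PRECONDITION & SPEC =====
-- Pre_ excludes only depth < 0, on which Python A recurses without bound (RecursionError).
def Pre_tree_traverse (num : Int) (depth : Int) (node_count : Int) : Prop := 0 ≤ depth
instance (num : Int) (depth : Int) (node_count : Int) : Decidable (Pre_tree_traverse num depth node_count) := by unfold Pre_tree_traverse; infer_instance
def pvWitness_tree_traverse : Int × Int × Int := (5, 3, 1)

def Spec_tree_traverse (num : Int) (depth : Int) (node_count : Int) (out : List Int) : Prop := out = tree_traverse_alt num depth node_count
instance (num : Int) (depth : Int) (node_count : Int) (out : List Int) : Decidable (Spec_tree_traverse num depth node_count out) := by unfold Spec_tree_traverse; infer_instance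

-- ===== CLAIM (what is proved, stated in full; the proofs are below) =====
def Claim_equal_tree_traverse : Prop := ∀ (num : Int) (depth : Int) (node_count : Int), Dom_tree_traverse num depth node_count → Pre_tree_traverse num depth node_count → Spec_tree_traverse num depth node_count (tree_traverse num depth node_count)

-- ===== LEMMAS AND PROOFS =====

lemma one_shiftLeft_int (n : Nat) : ((1 : Int) <<< n) = 2 ^ n := by
  rw [Int.shiftLeft_eq]; ring

lemma pow_shiftRight_one (m : Nat) : ((2 : Int) ^ (m + 1)) >>> (1 : Nat) = 2 ^ m := by
  rw [Int.shiftRight_eq_div_pow, pow_succ]; simp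

lemma treeLoop_nonpos (num half cur d : Int) (res : List Int) (h : d ≤ 0) :
    treeLoop num half cur d res = res := by
  rw [treeLoop]; simp [h]

lemma treeLoop_eq (n : Nat) : ∀ (num cur : Int) (res : List Int),
    treeLoop num (2 ^ n) cur ((n : Int) + 1) res
      = res ++ (tree_traverse num ((n : Int) + 1) cur).reverse := by
  induction n with
  | zero =>
    intro num cur res
    rw [treeLoop, tree_traverse]
    have h1 : ¬ ((0 : Int) + 1 ≤ 0) := by omega
    have h2 : (((0 : Int) + 1) - 1).toNat = 0 := by omega
    simp only [Nat.cast_zero, h1, h2, one_shiftLeft_int]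
    split_ifs <;> simp [tree_traverse, treeLoop_nonpos]
  | succ m ih =>
    intro num cur res
    have hcast : ((m + 1 : Nat) : Int) = (m : Int) + 1 := by push_cast; ring
    rw [hcast, treeLoop, tree_traverse]
    have h1 : ¬ ((m : Int) + 1 + 1 ≤ 0) := by omega
    have h3 : ((m : Int) + 1 + 1) - 1 = (m : Int) + 1 := by ring
    have h4 : ((m : Int) + 1).toNat = m + 1 := by omega
    simp only [h1, h3, h4, one_shiftLeft_int, pow_shiftRight_one]
    by_cases hc : num ≥ 2 ^ (m + 1)
    · rw [if_pos hc, if_pos hc, ih]; simp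
    · rw [if_neg hc, if_neg hc, ih]; simp

-- ===== VERDICT (by name: the statement is the Claim_ definition above) =====
theorem tree_traverse_spec : Claim_equal_tree_traverse := by
  intro num depth node_count _ hpre
  unfold Spec_tree_traverse tree_traverse_alt
  by_cases h0 : 0 < depth
  · obtain ⟨n, hn⟩ : ∃ n : Nat, depth = (n : Int) + 1 := ⟨(depth - 1).toNat, by omega⟩
    subst hn
    have h2 : (((n : Int) + 1) - 1).toNat = n := by omega
    simp only [h0, if_pos, h2, one_shiftLeft_int]
    rw [treeLoop_eq]
    simp
  · have hd : depth = 0 := by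
      unfold Pre_tree_traverse at hpre; omega
    subst hd
    simp [tree_traverse, treeLoop_nonpos]
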